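-- pv_equiv track=rewrite | github.com/Lumif-ai/flywheel-v2 | skills/_shared/validate_skills.py | _strip_changelog
-- ===== SOURCE A (Python) =====
-- def _strip_changelog(body):
--     """Return body text with changelog section removed.
--
--     A changelog section starts with '## Changelog' and runs to end of file
--     (or next H2 heading). Lines inside changelog tables (starting with |)
--     are historical records and should not trigger lint violations.
--     """
--     lines = body.split("\n")
--     result = []
--     in_changelog = False
--     for line in lines:
--         stripped = line.strip()
--         if stripped.lower().startswith("## changelog"):
--             in_changelog = True
--             continue
--         if in_changelog:
--             # Exit changelog if we hit another H2 heading
--             if stripped.startswith("## ") and not stripped.lower().startswith("## changelog"):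
--                 in_changelog = False
--                 result.append(line)
--             # Otherwise skip everything in changelog
--             continue
--         result.append(line)
--     return "\n".join(result)
-- ===== SOURCE B (Python) =====
-- def _is_h2(line):
--     return line.strip().startswith("## ")
--
--
-- def _is_changelog_heading(line):
--     return line.strip().lower().startswith("## changelog")
--
--
-- def _strip_changelog(body):
--     """Partition the lines at H2 headings and drop the changelog sections."""
--     lines = body.split("\n")
--     k = next((i for i, l in enumerate(lines) if _is_h2(l)), len(lines))
--     kept = lines[:k]          # preamble before the first H2 heading
--     rest = lines[k:]
--     while rest:
--         head, tail = rest[0], rest[1:]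
--         k = next((i for i, l in enumerate(tail) if _is_h2(l)), len(tail))
--         if not _is_changelog_heading(head):
--             kept += [head] + tail[:k]
--         rest = tail[k:]
--     return "\n".join(kept)
-- ===== Notes on version B (the rewrite author's own statement) =====
-- stated objective: alternative
-- what changed: Replaces A's single pass with an in_changelog boolean state machine by a section-partition strategy: keep the preamble before the first H2 heading, then repeatedly take one H2 heading plus its section body and keep the whole section unless its heading is a changelog heading.
import Mathlib
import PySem

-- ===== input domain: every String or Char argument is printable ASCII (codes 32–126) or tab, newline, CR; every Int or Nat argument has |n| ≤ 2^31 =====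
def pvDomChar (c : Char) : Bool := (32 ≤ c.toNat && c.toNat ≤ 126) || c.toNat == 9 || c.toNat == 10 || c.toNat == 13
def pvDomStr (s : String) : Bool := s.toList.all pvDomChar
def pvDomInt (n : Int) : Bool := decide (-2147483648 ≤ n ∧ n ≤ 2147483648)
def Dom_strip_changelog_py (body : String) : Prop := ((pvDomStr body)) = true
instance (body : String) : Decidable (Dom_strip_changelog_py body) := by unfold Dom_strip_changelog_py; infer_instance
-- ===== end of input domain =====

-- B replaces A's in_changelog state machine by a partition of the lines into H2-headed
-- sections, dropping the changelog sections wholesale (objective: alternative, same cost).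

-- ===== PORT A =====
-- the for-loop of A with its in_changelog flag, as structural recursion over the lines
def pvLoopA : List String → Bool → List String
  | [], _ => []
  | line :: rest, inCh =>
    let stripped := PySem.Str.strip line
    if PySem.Str.startswith (PySem.Str.lower stripped) "## changelog" then
      pvLoopA rest true
    else if inCh then
      if PySem.Str.startswith stripped "## " &&
         !PySem.Str.startswith (PySem.Str.lower stripped) "## changelog" then
        line :: pvLoopA rest false
      else
        pvLoopA rest inCh
    else
      line :: pvLoopA rest inCh

def strip_changelog_py (body : String) : String :=
  -- body.split("\n") = Str.split? with the nonempty separator "\n", unfolded to its Chars form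
  let lines := (PySem.Chars.splitOn body.toList "\n".toList).map String.ofList
  PySem.Str.join "\n" (pvLoopA lines false)

-- ===== PORT B =====
def pvIsH2 (line : String) : Bool :=
  PySem.Str.startswith (PySem.Str.strip line) "## "

def pvIsChangelogHeading (line : String) : Bool :=
  PySem.Str.startswith (PySem.Str.lower (PySem.Str.strip line)) "## changelog"

-- the while-loop of B: each step consumes one H2 heading plus its section body
def pvSections : List String → List String
  | [] => []
  | head :: tail =>
    let sect := tail.takeWhile (fun l => !pvIsH2 l)
    let rest := tail.dropWhile (fun l => !pvIsH2 l)
    (if pvIsChangelogHeading head then [] else head :: sect) ++ pvSections rest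
  termination_by ls => ls.length
  decreasing_by
    simpa using Nat.lt_succ_of_le (List.length_dropWhile_le _ _)

def strip_changelog_py_alt (body : String) : String :=
  let lines := (PySem.Chars.splitOn body.toList "\n".toList).map String.ofList
  let kept := lines.takeWhile (fun l => !pvIsH2 l)
  PySem.Str.join "\n" (kept ++ pvSections (lines.dropWhile (fun l => !pvIsH2 l)))

-- ===== PRECONDITION & SPEC =====
def Spec_strip_changelog_py (body : String) (out : String) : Prop := out = strip_changelog_py_alt body
instance (body : String) (out : String) : Decidable (Spec_strip_changelog_py body out) := by unfold Spec_strip_changelog_py; infer_instance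

-- ===== CLAIM (what is proved, stated in full; the proofs are below) =====
def Claim_equal_strip_changelog_py : Prop := ∀ (body : String), Dom_strip_changelog_py body → Spec_strip_changelog_py body (strip_changelog_py body)

-- ===== LEMMAS AND PROOFS =====

theorem pvCharToNat_ofNat (n : Nat) (h : n < 55296) : (Char.ofNat n).toNat = n := by
  unfold Char.ofNat
  rw [dif_pos (by exact Or.inl h)]
  simp [Char.ofNatAux, Char.toNat]

-- a character whose lowercase form is below 'A' already was that character
theorem pvLowerChar_fix {c t : Char} (ht : t.toNat < 65) (h : PySem.Chars.lowerChar c = t) :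
    c = t := by
  unfold PySem.Chars.lowerChar PySem.Chars.isupper at h
  by_cases hu : ('A' ≤ c ∧ c ≤ 'Z')
  · rw [if_pos (by simp [hu.1, hu.2])] at h
    have h1 : (65:Nat) ≤ c.toNat := by
      have := Char.le_def.mp hu.1
      rw [UInt32.le_iff_toNat_le, Char.toNat_val, Char.toNat_val] at this
      simpa using this
    have h2 : c.toNat ≤ (90:Nat) := by
      have := Char.le_def.mp hu.2
      rw [UInt32.le_iff_toNat_le, Char.toNat_val, Char.toNat_val] at this
      simpa using this
    have h3 := congrArg Char.toNat h
    rw [pvCharToNat_ofNat _ (by omega)] at h3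
    omega
  · rw [if_neg (by simpa using fun h1 h2 => hu ⟨h1, h2⟩)] at h
    exact h

-- a changelog heading is in particular an H2 heading
theorem pvCl_imp_h2 {l : String} (h : pvIsChangelogHeading l = true) : pvIsH2 l = true := by
  unfold pvIsChangelogHeading at h
  unfold pvIsH2
  rw [PySem.Str.startswith_eq, PySem.Chars.startswith_iff] at h ⊢
  rw [PySem.Str.toList_lower] at h
  obtain ⟨t, ht⟩ := h
  cases hs : (PySem.Str.strip l).toList with
  | nil => rw [hs] at ht; simp [PySem.Chars.lower] at ht
  | cons a s1 =>
    cases s1 with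
    | nil => rw [hs] at ht; simp [PySem.Chars.lower] at ht
    | cons b s2 =>
      cases s2 with
      | nil => rw [hs] at ht; simp [PySem.Chars.lower] at ht
      | cons c s3 =>
        rw [hs] at ht
        simp [PySem.Chars.lower] at ht
        obtain ⟨ha, hb, hc, -⟩ := ht
        rw [pvLowerChar_fix (by decide) ha.symm, pvLowerChar_fix (by decide) hb.symm,
          pvLowerChar_fix (by decide) hc.symm]
        exact ⟨s3, by simp⟩

-- main invariant: A's flag machine computes B's section partition
theorem pvMain (t : List String) : ∀ b : Bool,
    pvLoopA t b =
      (if b then [] else t.takeWhile (fun l => !pvIsH2 l)) ++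
        pvSections (t.dropWhile (fun l => !pvIsH2 l)) := by
  induction t with
  | nil => intro b; cases b <;> simp [pvLoopA, pvSections]
  | cons l t ih =>
    intro b
    by_cases hcl : pvIsChangelogHeading l = true
    · have hh2 := pvCl_imp_h2 hcl
      have hclS : PySem.Str.startswith (PySem.Str.lower (PySem.Str.strip l)) "## changelog" = true := hcl
      cases b <;>
        simp only [pvLoopA, List.takeWhile_cons, List.dropWhile_cons, hclS, hh2,
          Bool.not_true, ih] <;>
        simp [pvSections, hcl]
    · have hcl0 : pvIsChangelogHeading l = false := eq_false_of_ne_true hcl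
      have hclS : PySem.Str.startswith (PySem.Str.lower (PySem.Str.strip l)) "## changelog" = false := hcl0
      by_cases hh2 : pvIsH2 l = true
      · have hh2S : PySem.Str.startswith (PySem.Str.strip l) "## " = true := hh2
        cases b <;>
          simp only [pvLoopA, List.takeWhile_cons, List.dropWhile_cons, hclS, hh2S, hh2,
            Bool.not_true, ih] <;>
          simp [pvSections, hcl0]
      · have hh20 : pvIsH2 l = false := eq_false_of_ne_true hh2
        have hh2S : PySem.Str.startswith (PySem.Str.strip l) "## " = false := hh20
        cases b <;>
          simp only [pvLoopA, List.takeWhile_cons, List.dropWhile_cons, hclS, hh2S, hh20,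
            Bool.not_false, ih] <;>
          simp

-- ===== VERDICT (by name: the statement is the Claim_ definition above) =====
theorem strip_changelog_py_spec : Claim_equal_strip_changelog_py := by
  intro body _
  unfold Spec_strip_changelog_py strip_changelog_py strip_changelog_py_alt
  simp only [pvMain, if_neg Bool.false_ne_true]
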